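-- pv_equiv track=rewrite | github.com/ChuhanXU/LeetCode | Robinhood/coolFeature.py | coolfeature
-- ===== SOURCE A (Python) =====
-- def coolfeature(a,b,querys):
--     n= len(a)
--     m = len(b)
--     q=0
--     ans = [0]*2
--     for query in querys:
--         if query[0]==1:
--             ans[q]=operation1(a,b,n,m,query)
--             q+=1
--         if query[0]==0:
--             b[query[1]]=query[2]
--     return ans
--
-- def operation1(a,b,n,m,query):
--     ans = 0
--     for i in range(n):
--         for j in range(m):
--             if a[i] + b[j] == query[1]:
--                 ans += 1
--     return ans
-- ===== SOURCE B (Python) =====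
-- def coolfeature(a, b, querys):
--     # Count dictionary of b, maintained across updates; each type-1 query is answered
--     # by one pass over a. Mutates b in place exactly like the original.
--     cnt = {}
--     for x in b:
--         cnt[x] = cnt.get(x, 0) + 1
--     ans = [0] * 2
--     q = 0
--     for query in querys:
--         if query[0] == 1:
--             t = query[1]
--             ans[q] = sum(cnt.get(t - x, 0) for x in a)
--             q += 1
--         elif query[0] == 0:
--             i, v = query[1], query[2]
--             old = b[i]
--             cnt[old] -= 1
--             cnt[v] = cnt.get(v, 0) + 1
--             b[i] = v
--     return ans
-- ===== Notes on version B (the rewrite author's own statement) =====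
-- stated objective: alternative
-- what changed: B builds a count dictionary of b once and keeps it consistent across type-0 updates, answering each type-1 query with a single pass over a looking up target-a[i], instead of A's nested scan of all pairs of a and b per query.
-- outside the precondition, e.g. on coolfeature([5], [], [[1]]): A returns [0, 0], B raises IndexError
import Mathlib
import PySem

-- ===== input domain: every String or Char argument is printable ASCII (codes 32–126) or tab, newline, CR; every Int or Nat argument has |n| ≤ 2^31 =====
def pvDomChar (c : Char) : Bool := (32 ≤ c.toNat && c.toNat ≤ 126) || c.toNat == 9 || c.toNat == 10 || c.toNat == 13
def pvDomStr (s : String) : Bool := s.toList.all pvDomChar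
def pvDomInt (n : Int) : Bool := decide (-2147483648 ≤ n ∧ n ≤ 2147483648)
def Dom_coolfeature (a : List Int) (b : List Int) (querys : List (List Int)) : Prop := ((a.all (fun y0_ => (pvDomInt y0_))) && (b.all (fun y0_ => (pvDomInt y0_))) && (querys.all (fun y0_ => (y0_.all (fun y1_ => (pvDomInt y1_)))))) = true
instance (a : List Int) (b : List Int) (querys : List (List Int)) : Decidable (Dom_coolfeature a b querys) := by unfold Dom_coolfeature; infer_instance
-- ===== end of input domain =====

-- B answers each type-1 query with one pass over a through a maintained count dictionary of b,
-- instead of A's nested scan of all a×b pairs per query (alternative algorithm; in Python both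
-- mutate b in place the same way — the equivalence proved is about the return value).


-- ===== PORT A =====
-- operation1: the nested pair scan (range indices via pyRange/pyGetD; exact inside Pre_, where all indices are in range)
def pyOp1 (a b : List Int) (n m : Int) (query : List Int) : Int :=
  (PySem.List.pyRange 0 n 1).foldl (fun ans i =>
    (PySem.List.pyRange 0 m 1).foldl (fun ans j =>
      if PySem.List.pyGetD a i 0 + PySem.List.pyGetD b j 0 = PySem.List.pyGetD query 1 0
      then ans + 1 else ans) ans) 0

-- one iteration of A's loop over querys; state = (b, q, ans); q is the Nat write index of ans
def stepA (a : List Int) (n m : Int) (st : List Int × Nat × List Int) (query : List Int) :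
    List Int × Nat × List Int :=
  let st1 := if PySem.List.pyGetD query 0 0 = 1 then
      (st.1, st.2.1 + 1, st.2.2.set st.2.1 (pyOp1 a st.1 n m query))
    else st
  if PySem.List.pyGetD query 0 0 = 0 then
    (PySem.List.pySetD st1.1 (PySem.List.pyGetD query 1 0) (PySem.List.pyGetD query 2 0), st1.2)
  else st1

def coolfeature (a : List Int) (b : List Int) (querys : List (List Int)) : List Int :=
  (querys.foldl (stepA a (a.length : Int) (b.length : Int)) (b, 0, [0, 0])).2.2

-- ===== PORT B =====
-- one iteration of B's loop; state = (b, cnt, q, ans); cnt is the counter dict of the current b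
def stepB (a : List Int) (st : List Int × PySem.Dict Int Int × Nat × List Int) (query : List Int) :
    List Int × PySem.Dict Int Int × Nat × List Int :=
  if PySem.List.pyGetD query 0 0 = 1 then
    let t := PySem.List.pyGetD query 1 0
    (st.1, st.2.1, st.2.2.1 + 1,
      st.2.2.2.set st.2.2.1 (a.foldl (fun s x => s + st.2.1.getD (t - x) 0) 0))
  else if PySem.List.pyGetD query 0 0 = 0 then
    let i := PySem.List.pyGetD query 1 0
    let v := PySem.List.pyGetD query 2 0
    let old := PySem.List.pyGetD st.1 i 0
    let c1 := st.2.1.insert old (st.2.1.getD old 0 - 1)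
    let c2 := c1.insert v (c1.getD v 0 + 1)
    (PySem.List.pySetD st.1 i v, c2, st.2.2.1, st.2.2.2)
  else st

def coolfeature_alt (a : List Int) (b : List Int) (querys : List (List Int)) : List Int :=
  let cnt := b.foldl (fun d x => d.insert x (d.getD x 0 + 1)) PySem.Dict.empty
  (querys.foldl (stepB a) (b, cnt, 0, [0, 0])).2.2.2

-- ===== PRECONDITION & SPEC =====
-- Pre_ excludes exactly A's crashes (more than two type-1 queries → IndexError on ans; empty or too-short
-- queries → IndexError; type-0 index out of range → IndexError), plus the degenerate inputs where a type-1
-- query shorter than 2 does not crash A only because a or b is empty (there B raises where A returns [0,0]).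
def Pre_coolfeature (a : List Int) (b : List Int) (querys : List (List Int)) : Prop :=
  querys.countP (fun qr => qr.getD 0 0 == 1) ≤ 2 ∧
  ∀ qr ∈ querys, qr ≠ [] ∧
    (qr.getD 0 0 = 1 → 2 ≤ qr.length) ∧
    (qr.getD 0 0 = 0 → 3 ≤ qr.length ∧ -(b.length : Int) ≤ qr.getD 1 0 ∧ qr.getD 1 0 < (b.length : Int))
instance (a : List Int) (b : List Int) (querys : List (List Int)) : Decidable (Pre_coolfeature a b querys) := by
  unfold Pre_coolfeature; infer_instance

def pvWitness_coolfeature : List Int × List Int × List (List Int) :=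
  ([1, 2], [3], [[1, 4], [0, 0, 1], [1, 3]])

def Spec_coolfeature (a : List Int) (b : List Int) (querys : List (List Int)) (out : List Int) : Prop :=
  out = coolfeature_alt a b querys
instance (a : List Int) (b : List Int) (querys : List (List Int)) (out : List Int) : Decidable (Spec_coolfeature a b querys out) := by
  unfold Spec_coolfeature; infer_instance

-- ===== CLAIM (what is proved, stated in full; the proofs are below) =====
def Claim_equal_coolfeature : Prop := ∀ (a : List Int) (b : List Int) (querys : List (List Int)), Dom_coolfeature a b querys → Pre_coolfeature a b querys → Spec_coolfeature a b querys (coolfeature a b querys)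

-- ===== LEMMAS AND PROOFS =====

-- Python's normalised in-range index
def nidx (n : Nat) (i : Int) : Nat := if 0 ≤ i then i.toNat else n - (-i).toNat

theorem pyIdx_eq_nidx (n : Nat) (i : Int) (h1 : -(n : Int) ≤ i) (h2 : i < (n : Int)) :
    PySem.List.pyIdx? n i = some (nidx n i) := by
  unfold PySem.List.pyIdx? nidx; split_ifs <;> simp_all

theorem nidx_lt (n : Nat) (i : Int) (h1 : -(n : Int) ≤ i) (h2 : i < (n : Int)) : nidx n i < n := by
  unfold nidx; split_ifs <;> omega

theorem pySetD_eq_set (xs : List Int) (i : Int) (v : Int)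
    (h1 : -(xs.length : Int) ≤ i) (h2 : i < (xs.length : Int)) :
    PySem.List.pySetD xs i v = xs.set (nidx xs.length i) v := by
  unfold PySem.List.pySetD PySem.List.pySet?
  rw [pyIdx_eq_nidx _ _ h1 h2]; rfl

theorem pyGetD_eq_nidx (xs : List Int) (i : Int)
    (h1 : -(xs.length : Int) ≤ i) (h2 : i < (xs.length : Int)) :
    PySem.List.pyGetD xs i 0 = xs[nidx xs.length i]'(nidx_lt _ _ h1 h2) := by
  unfold PySem.List.pyGetD PySem.List.pyGet?
  rw [pyIdx_eq_nidx _ _ h1 h2]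
  simp [List.getElem?_eq_getElem (nidx_lt _ _ h1 h2)]

-- the three shapes of one iteration of each loop
theorem stepA_one (a : List Int) (n m : Int) (b : List Int) (q : Nat) (ans : List Int)
    (query : List Int) (h : PySem.List.pyGetD query 0 0 = 1) :
    stepA a n m (b, q, ans) query = (b, q + 1, ans.set q (pyOp1 a b n m query)) := by
  simp [stepA, h]

theorem stepA_zero (a : List Int) (n m : Int) (b : List Int) (q : Nat) (ans : List Int)
    (query : List Int) (h : PySem.List.pyGetD query 0 0 = 0) :
    stepA a n m (b, q, ans) query
      = (PySem.List.pySetD b (PySem.List.pyGetD query 1 0) (PySem.List.pyGetD query 2 0), q, ans) := by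
  simp [stepA, h]

theorem stepA_other (a : List Int) (n m : Int) (b : List Int) (q : Nat) (ans : List Int)
    (query : List Int) (h1 : ¬ PySem.List.pyGetD query 0 0 = 1)
    (h0 : ¬ PySem.List.pyGetD query 0 0 = 0) :
    stepA a n m (b, q, ans) query = (b, q, ans) := by
  simp [stepA, h1, h0]

theorem stepB_one (a : List Int) (b : List Int) (cnt : PySem.Dict Int Int) (q : Nat)
    (ans : List Int) (query : List Int) (h : PySem.List.pyGetD query 0 0 = 1) :
    stepB a (b, cnt, q, ans) query
      = (b, cnt, q + 1,
         ans.set q (a.foldl (fun s x => s + cnt.getD (PySem.List.pyGetD query 1 0 - x) 0) 0)) := by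
  simp [stepB, h]

theorem stepB_zero (a : List Int) (b : List Int) (cnt : PySem.Dict Int Int) (q : Nat)
    (ans : List Int) (query : List Int) (h0 : PySem.List.pyGetD query 0 0 = 0) :
    stepB a (b, cnt, q, ans) query
      = (PySem.List.pySetD b (PySem.List.pyGetD query 1 0) (PySem.List.pyGetD query 2 0),
         (cnt.insert (PySem.List.pyGetD b (PySem.List.pyGetD query 1 0) 0)
              (cnt.getD (PySem.List.pyGetD b (PySem.List.pyGetD query 1 0) 0) 0 - 1)).insert
           (PySem.List.pyGetD query 2 0)
           ((cnt.insert (PySem.List.pyGetD b (PySem.List.pyGetD query 1 0) 0)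
                (cnt.getD (PySem.List.pyGetD b (PySem.List.pyGetD query 1 0) 0) 0 - 1)).getD
              (PySem.List.pyGetD query 2 0) 0 + 1),
         q, ans) := by
  simp [stepB, h0]

theorem stepB_other (a : List Int) (b : List Int) (cnt : PySem.Dict Int Int) (q : Nat)
    (ans : List Int) (query : List Int) (h1 : ¬ PySem.List.pyGetD query 0 0 = 1)
    (h0 : ¬ PySem.List.pyGetD query 0 0 = 0) :
    stepB a (b, cnt, q, ans) query = (b, cnt, q, ans) := by
  simp [stepB, h1, h0]

-- A's nested pair scan equals one pass over a through any counter of the current b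
theorem op1_eq_counter (a b : List Int) (query : List Int) (cnt : PySem.Dict Int Int)
    (m : Nat) (hm : b.length = m)
    (hc : ∀ k, cnt.getD k 0 = (b.count k : Int)) :
    pyOp1 a b (a.length : Int) (m : Int) query =
      a.foldl (fun s x => s + cnt.getD (PySem.List.pyGetD query 1 0 - x) 0) 0 := by
  subst hm
  unfold pyOp1
  set t := PySem.List.pyGetD query 1 0 with ht
  have inner : ∀ (x acc : Int),
      (PySem.List.pyRange 0 (b.length : Int) 1).foldl
        (fun ans j => if x + PySem.List.pyGetD b j 0 = t then ans + 1 else ans) acc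
      = acc + (b.count (t - x) : Int) := by
    intro x acc
    rw [PySem.List.foldl_pyRange_zero_pyGetD' b 0 (fun ans y => if x + y = t then ans + 1 else ans) acc]
    have hfun : (fun (ans : Int) (y : Int) => if x + y = t then ans + 1 else ans)
        = (fun ans y => if (fun y => decide (x + y = t)) y = true then ans + 1 else ans) := by
      funext ans y; simp
    rw [hfun, PySem.List.foldl_count_if]
    congr 2
    rw [List.count, List.countP_congr]
    intro y _
    simp only [decide_eq_true_eq, beq_iff_eq]
    omega
  rw [PySem.List.foldl_pyRange_zero_pyGetD' a 0
      (fun acc x => (PySem.List.pyRange 0 (b.length : Int) 1).foldl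
        (fun ans j => if x + PySem.List.pyGetD b j 0 = t then ans + 1 else ans) acc) 0]
  simp only [inner, ← hc]

-- the update step keeps the counter exact for the updated list
theorem counter_update (b : List Int) (cnt : PySem.Dict Int Int)
    (hc : ∀ k, cnt.getD k 0 = (b.count k : Int)) (j : Nat) (hj : j < b.length) (v : Int) :
    ∀ k, (((cnt.insert b[j] (cnt.getD b[j] 0 - 1)).insert v
            ((cnt.insert b[j] (cnt.getD b[j] 0 - 1)).getD v 0 + 1)).getD k 0)
          = ((b.set j v).count k : Int) := by
  intro k
  have hcount := List.count_set (a := v) (b := k) (l := b) hj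
  have hpos : b[j] = k → 1 ≤ b.count k := by
    intro h; exact List.count_pos_iff.mpr (h ▸ List.getElem_mem hj)
  simp only [beq_iff_eq] at hcount
  rw [hcount, PySem.Dict.getD_insert, PySem.Dict.getD_insert, PySem.Dict.getD_insert]
  simp only [hc]
  split_ifs at * <;> subst_vars <;> omega

-- main loop invariant: A's state (b, q, ans) and B's state (b, cnt, q, ans) stay in lockstep
theorem loop_eq (a : List Int) (m : Nat) :
    ∀ (qs : List (List Int)) (b : List Int) (cnt : PySem.Dict Int Int) (q : Nat) (ans : List Int),
    b.length = m →
    (∀ k, cnt.getD k 0 = (b.count k : Int)) →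
    (∀ qr ∈ qs, PySem.List.pyGetD qr 0 0 = 0 →
        -(m : Int) ≤ PySem.List.pyGetD qr 1 0 ∧ PySem.List.pyGetD qr 1 0 < (m : Int)) →
    (qs.foldl (stepA a (a.length : Int) (m : Int)) (b, q, ans)).2.2
      = (qs.foldl (stepB a) (b, cnt, q, ans)).2.2.2 := by
  intro qs
  induction qs with
  | nil => intro b cnt q ans _ _ _; rfl
  | cons qr qs ih =>
    intro b cnt q ans hm hc hq
    have hqs : ∀ x ∈ qs, PySem.List.pyGetD x 0 0 = 0 →
        -(m : Int) ≤ PySem.List.pyGetD x 1 0 ∧ PySem.List.pyGetD x 1 0 < (m : Int) :=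
      fun x hx => hq x (List.mem_cons_of_mem _ hx)
    simp only [List.foldl_cons]
    by_cases h1 : PySem.List.pyGetD qr 0 0 = 1
    · rw [stepA_one a _ _ b q ans qr h1, stepB_one a b cnt q ans qr h1,
        op1_eq_counter a b qr cnt m hm hc]
      exact ih b cnt (q + 1) _ hm hc hqs
    · by_cases h0 : PySem.List.pyGetD qr 0 0 = 0
      · obtain ⟨hlo, hhi⟩ := hq qr List.mem_cons_self h0
        have hlo' : -(b.length : Int) ≤ PySem.List.pyGetD qr 1 0 := by rw [hm]; exact hlo
        have hhi' : PySem.List.pyGetD qr 1 0 < (b.length : Int) := by rw [hm]; exact hhi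
        have hjlt := nidx_lt b.length _ hlo' hhi'
        rw [stepA_zero a _ _ b q ans qr h0, stepB_zero a b cnt q ans qr h0,
          pySetD_eq_set b _ _ hlo' hhi', pyGetD_eq_nidx b _ hlo' hhi']
        exact ih _ _ q ans (by simpa using hm) (counter_update b cnt hc _ hjlt _) hqs
      · rw [stepA_other a _ _ b q ans qr h1 h0, stepB_other a b cnt q ans qr h1 h0]
        exact ih b cnt q ans hm hc hqs

-- bridge from Pre_'s List.getD phrasing to the ports' pyGetD at the literal indices 0 and 1
theorem pyGetD_lit (xs : List Int) (k : Nat) (d : Int) :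
    PySem.List.pyGetD xs (k : Int) d = xs.getD k d := PySem.List.pyGetD_natCast xs k d

-- ===== VERDICT (by name: the statement is the Claim_ definition above) =====
theorem coolfeature_spec : Claim_equal_coolfeature := by
  intro a b querys _ hpre
  unfold Spec_coolfeature coolfeature coolfeature_alt
  refine loop_eq a b.length querys b _ 0 [0, 0] rfl
    (fun k => by simpa using PySem.Dict.getD_foldl_insert_add_one b PySem.Dict.empty k) ?_
  intro qr hqr h0
  have e0 : PySem.List.pyGetD qr (0 : Int) 0 = qr.getD 0 0 := by
    exact_mod_cast pyGetD_lit qr 0 0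
  have e1 : PySem.List.pyGetD qr (1 : Int) 0 = qr.getD 1 0 := by
    exact_mod_cast pyGetD_lit qr 1 0
  rw [e1]
  exact ((hpre.2 qr hqr).2.2 (by rw [← e0]; exact h0)).2
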